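-- pv_equiv track=rewrite | github.com/thealper2/leetcode-solutions | 3800-3899/3803-Count-Residue-Prefixes.py | residuePrefixes
-- ===== SOURCE A (Python) =====
-- def residuePrefixes(s: str) -> int:
--     n = len(s)
--     cnt = 0
--     for i in range(1, n + 1):
--         prefix = s[:i]
--         if len(set(prefix)) == len(prefix) % 3:
--             cnt += 1
--
--     return cnt
-- ===== SOURCE B (Python) =====
-- def residuePrefixes(s: str) -> int:
--     # Single left-to-right pass with an incremental distinct-set; stop as soon
--     # as the distinct count reaches 3, since i % 3 < 3 can never match again.
--     cnt = 0
--     seen = set()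
--     i = 0
--     for ch in s:
--         i += 1
--         seen.add(ch)
--         d = len(seen)
--         if d >= 3:
--             break
--         if d == i % 3:
--             cnt += 1
--     return cnt
-- ===== Notes on version B (the rewrite author's own statement) =====
-- stated objective: faster
-- what changed: Replaces the rebuild-set(prefix)-for-every-prefix scan with a single incremental pass that maintains the running distinct-character set and breaks as soon as it reaches 3 distinct characters, since the distinct count is non-decreasing and i % 3 < 3 can never match afterwards.
import Mathlib
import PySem

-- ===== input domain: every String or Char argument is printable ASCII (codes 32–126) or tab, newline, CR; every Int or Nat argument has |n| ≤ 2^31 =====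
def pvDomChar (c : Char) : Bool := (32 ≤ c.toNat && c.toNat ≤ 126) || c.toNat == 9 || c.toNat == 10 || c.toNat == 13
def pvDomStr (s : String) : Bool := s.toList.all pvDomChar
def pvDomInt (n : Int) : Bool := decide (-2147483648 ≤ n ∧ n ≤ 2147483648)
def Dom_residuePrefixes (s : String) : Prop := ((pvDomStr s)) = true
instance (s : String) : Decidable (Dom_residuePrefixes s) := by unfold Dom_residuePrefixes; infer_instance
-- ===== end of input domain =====

-- B replaces A's rebuild-set(pfx)-per-pfx scan with one incremental pass over the
-- characters that breaks once 3 distinct characters are seen (i % 3 < 3 never matches after);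
-- objective: faster (O(n) vs O(n^2)).


-- ===== PORT A =====
def residuePrefixes (s : String) : Int :=
  let n : Int := (s.toList.length : Int)
  (PySem.List.pyRange 1 (n + 1) 1).foldl
    (fun cnt i =>
      let pfx := PySem.List.slice s.toList none (some i)
      if ((PySem.Set.ofList pfx).length : Int) = PySem.Int.mod (pfx.length : Int) 3 then
        cnt + 1
      else cnt)
    0

-- ===== PORT B =====
-- the for-loop of Source B with its early `break`: recursion over the remaining characters
def residuePrefixesAltLoop : List Char → PySem.Set Char → Int → Int → Int
  | [], _, _, cnt => cnt
  | c :: rest, seen, i, cnt =>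
      let seen' := PySem.Set.add seen c
      let d : Int := (seen'.length : Int)
      if 3 ≤ d then cnt        -- break
      else if d = PySem.Int.mod (i + 1) 3 then residuePrefixesAltLoop rest seen' (i + 1) (cnt + 1)
      else residuePrefixesAltLoop rest seen' (i + 1) cnt

def residuePrefixes_alt (s : String) : Int :=
  residuePrefixesAltLoop s.toList PySem.Set.empty 0 0

-- ===== PRECONDITION & SPEC =====
def Spec_residuePrefixes (s : String) (out : Int) : Prop := out = residuePrefixes_alt s
instance (s : String) (out : Int) : Decidable (Spec_residuePrefixes s out) := by unfold Spec_residuePrefixes; infer_instance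

-- ===== CLAIM (what is proved, stated in full; the proofs are below) =====
def Claim_equal_residuePrefixes : Prop := ∀ (s : String), Dom_residuePrefixes s → Spec_residuePrefixes s (residuePrefixes s)

-- ===== LEMMAS AND PROOFS =====

-- the common mathematical value: contribution of the prefixes extending p by rest, one char at a time
def specCount : List Char → List Char → Int
  | _, [] => 0
  | p, c :: rest =>
      (if ((PySem.Set.ofList (p ++ [c])).length : Int) = PySem.Int.mod ((p.length : Int) + 1) 3 then (1 : Int) else 0)
        + specCount (p ++ [c]) rest

theorem ofList_append_singleton (p : List Char) (c : Char) :
    PySem.Set.ofList (p ++ [c]) = PySem.Set.add (PySem.Set.ofList p) c := by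
  simp [PySem.Set.ofList_eq_foldl, List.foldl_append]

theorem len_add_ge (s : PySem.Set Char) (c : Char) :
    s.length ≤ (PySem.Set.add s c).length := by
  by_cases h : c ∈ s
  · simp [PySem.Set.add_of_mem h]
  · simp [PySem.Set.add_of_not_mem h]

theorem specCount_zero_of_big (rest p : List Char)
    (h : 3 ≤ ((PySem.Set.ofList p).length : Int)) : specCount p rest = 0 := by
  induction rest generalizing p with
  | nil => rfl
  | cons c rs ih =>
      have hmono : 3 ≤ ((PySem.Set.ofList (p ++ [c])).length : Int) := by
        rw [ofList_append_singleton]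
        have := len_add_ge (PySem.Set.ofList p) c
        omega
      have hlt : PySem.Int.mod ((p.length : Int) + 1) 3 < 3 :=
        PySem.Int.mod_lt _ (by norm_num)
      simp only [specCount]
      rw [if_neg (by omega), ih _ hmono]
      ring

theorem altLoop_eq_specCount (rest p : List Char) (cnt : Int) :
    residuePrefixesAltLoop rest (PySem.Set.ofList p) (p.length : Int) cnt
      = cnt + specCount p rest := by
  induction rest generalizing p cnt with
  | nil => simp [residuePrefixesAltLoop, specCount]
  | cons c rs ih =>
      simp only [residuePrefixesAltLoop, specCount, ← ofList_append_singleton]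
      by_cases hbig : 3 ≤ ((PySem.Set.ofList (p ++ [c])).length : Int)
      · rw [if_pos hbig]
        have hlt : PySem.Int.mod ((p.length : Int) + 1) 3 < 3 :=
          PySem.Int.mod_lt _ (by norm_num)
        rw [if_neg (by omega), specCount_zero_of_big rs _ hbig]
        ring
      · rw [if_neg hbig]
        have hlen : ((p ++ [c]).length : Int) = (p.length : Int) + 1 := by
          simp
        by_cases hc : ((PySem.Set.ofList (p ++ [c])).length : Int) = PySem.Int.mod ((p.length : Int) + 1) 3
        · rw [if_pos hc, if_pos hc]
          have := ih (p ++ [c]) (cnt + 1)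
          rw [hlen] at this
          rw [this]; ring
        · rw [if_neg hc, if_neg hc]
          have := ih (p ++ [c]) cnt
          rw [hlen] at this
          rw [this]; ring

theorem foldA_eq_specCount (rest p : List Char) (cnt : Int) :
    (PySem.List.pyRange ((p.length : Int) + 1) (((p ++ rest).length : Int) + 1) 1).foldl
      (fun cnt i =>
        let pfx := PySem.List.slice (p ++ rest) none (some i)
        if ((PySem.Set.ofList pfx).length : Int) = PySem.Int.mod (pfx.length : Int) 3 then
          cnt + 1
        else cnt)
      cnt = cnt + specCount p rest := by
  induction rest generalizing p cnt with
  | nil =>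
      rw [PySem.List.pyRange_one_eq_nil (by simp)]
      simp [specCount]
  | cons c rs ih =>
      rw [PySem.List.pyRange_one_cons (by simp)]
      simp only [List.foldl_cons]
      have hslice : PySem.List.slice (p ++ c :: rs) none (some ((p.length : Int) + 1))
          = p ++ [c] := by
        have hcast : ((p.length : Int) + 1) = ((p.length + 1 : Nat) : Int) := by push_cast; ring
        rw [hcast, PySem.List.slice_to_natCast,
          show p ++ c :: rs = (p ++ [c]) ++ rs by simp,
          List.take_append_of_le_length (by simp)]
        simp
      simp only [hslice]
      rw [show p ++ c :: rs = (p ++ [c]) ++ rs by simp]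
      have hlen1 : (((p ++ [c]).length : Nat) : Int) = (p.length : Int) + 1 := by simp
      specialize ih (p ++ [c])
      rw [hlen1] at ih
      simp only [hlen1]
      rw [ih]
      by_cases hc : ((PySem.Set.ofList (p ++ [c])).length : Int) = PySem.Int.mod ((p.length : Int) + 1) 3
      · simp only [specCount, if_pos hc]; ring
      · simp only [specCount, if_neg hc]; ring

-- ===== VERDICT (by name: the statement is the Claim_ definition above) =====
theorem residuePrefixes_spec : Claim_equal_residuePrefixes := by
  intro s _
  show residuePrefixes s = residuePrefixes_alt s
  have hA := foldA_eq_specCount s.toList [] 0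
  have hB := altLoop_eq_specCount s.toList [] 0
  simp only [List.nil_append, List.length_nil, Nat.cast_zero, zero_add] at hA hB
  exact hA.trans hB.symm
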